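-- pv_equiv track=rewrite | github.com/Liza-IITP/Data_Structures | Main/LargestKswap.py | swaps
-- ===== SOURCE A (Python) =====
-- def swaps(num, swap) :
--     num = list(num)
--     for i in range(len(num)) :
--         if swap == 0 :
--             break
--         max_index = i
--         for j in range(i+1, len(num)) :
--             if num[j] > num[max_index] :
--                 max_index = j
--         if max_index != i :
--             num[i], num[max_index] = num[max_index], num[i]
--             swap -= 1
--     return ''.join(num)
-- ===== SOURCE B (Python) =====
-- def swaps(num, swap):
--     # Sort once into a descending target, then fix each mismatching position
--     # by pulling in the leftmost occurrence of the target character.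
--     if swap == 0:
--         return num
--     arr = list(num)
--     target = sorted(arr, reverse=True)
--     for i, t in enumerate(target):
--         if arr[i] != t:
--             j = i + 1 + arr[i+1:].index(t)
--             arr[i], arr[j] = arr[j], arr[i]
--             swap -= 1
--             if swap == 0:
--                 break
--     return ''.join(arr)
-- ===== Notes on version B (the rewrite author's own statement) =====
-- stated objective: alternative
-- what changed: B sorts the characters once into a descending target and, for each position that mismatches the target, pulls in the leftmost occurrence of the target character, instead of A's per-position inner argmax rescans; same swaps, same result.
import Mathlib
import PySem

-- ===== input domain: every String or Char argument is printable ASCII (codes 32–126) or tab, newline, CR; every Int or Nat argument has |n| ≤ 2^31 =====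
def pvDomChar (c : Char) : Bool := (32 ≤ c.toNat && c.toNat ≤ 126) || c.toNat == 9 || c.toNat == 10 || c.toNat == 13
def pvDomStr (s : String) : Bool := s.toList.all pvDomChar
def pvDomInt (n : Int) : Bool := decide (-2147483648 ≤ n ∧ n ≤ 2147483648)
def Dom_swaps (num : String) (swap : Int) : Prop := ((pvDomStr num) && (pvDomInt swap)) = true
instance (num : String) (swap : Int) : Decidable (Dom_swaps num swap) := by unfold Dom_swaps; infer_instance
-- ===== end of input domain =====

-- B replaces A's per-position argmax rescans by one descending sort giving the target
-- character for every position, then pulls in the leftmost occurrence of it (objective: alternative).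

-- ===== PORT A =====
-- inner loop: 'for j in range(i+1, len(num)): if num[j] > num[max_index]: max_index = j'
def swapsInnerA (arr : List Char) (i : Int) : Int :=
  (PySem.List.pyRange (i + 1) (arr.length : Int)).foldl
    (fun mi j => if PySem.List.pyGetD arr mi ' ' < PySem.List.pyGetD arr j ' ' then j else mi) i

-- outer loop over the materialised range(len(num)), state (num, swap); 'break' = return state
def swapsLoopA : List Int → List Char × Int → List Char × Int
  | [], st => st
  | i :: rest, (arr, swap) =>
    if swap == 0 then (arr, swap)
    else
      let mi := swapsInnerA arr i
      if mi ≠ i then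
        let a := PySem.List.pyGetD arr i ' '
        let b := PySem.List.pyGetD arr mi ' '
        swapsLoopA rest (PySem.List.pySetD (PySem.List.pySetD arr i b) mi a, swap - 1)
      else swapsLoopA rest (arr, swap)

def swaps (num : String) (swap : Int) : String :=
  let arr := num.toList
  String.ofList (swapsLoopA (PySem.List.pyRange 0 (arr.length : Int)) (arr, swap)).1

-- ===== PORT B =====
-- 'for i, t in enumerate(target): …'; the 'none' branch is Python's ValueError from
-- list.index, which cannot fire because target is a permutation of arr.
def swapsLoopB : List (Int × Char) → List Char → Int → List Char
  | [], arr, _ => arr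
  | (i, t) :: rest, arr, swap =>
    if PySem.List.pyGetD arr i ' ' ≠ t then
      match PySem.List.index? (PySem.List.slice arr (some (i + 1)) none) t with
      | none => arr
      | some d =>
        let j : Int := i + 1 + (d : Int)
        let a := PySem.List.pyGetD arr i ' '
        let b := PySem.List.pyGetD arr j ' '
        let arr' := PySem.List.pySetD (PySem.List.pySetD arr i b) j a
        if swap - 1 == 0 then arr' else swapsLoopB rest arr' (swap - 1)
    else swapsLoopB rest arr swap

def swaps_alt (num : String) (swap : Int) : String :=
  if swap == 0 then num
  else
    let arr := num.toList
    let target := PySem.List.sorted arr (fun x => x) true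
    String.ofList (swapsLoopB (PySem.List.enumerate target 0) arr swap)

-- ===== PRECONDITION & SPEC =====
def Spec_swaps (num : String) (swap : Int) (out : String) : Prop := out = swaps_alt num swap
instance (num : String) (swap : Int) (out : String) : Decidable (Spec_swaps num swap out) := by unfold Spec_swaps; infer_instance

-- ===== CLAIM (what is proved, stated in full; the proofs are below) =====
def Claim_equal_swaps : Prop := ∀ (num : String) (swap : Int), Dom_swaps num swap → Spec_swaps num swap (swaps num swap)

-- ===== LEMMAS AND PROOFS =====

-- the argmax fold keeps the leftmost maximum
lemma foldArgmax (arr : List Char) (c : Nat) :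
    ∀ (fuel b rn : Nat), b + fuel = arr.length →
    rn < b → c ≤ rn →
    (∀ l, c ≤ l → l < b → arr.getD l ' ' ≤ arr.getD rn ' ') →
    (∀ l, c ≤ l → l < rn → arr.getD l ' ' < arr.getD rn ' ') →
    ∃ k : Nat,
      ((PySem.List.pyRange (b : Int) (arr.length : Int)).foldl
        (fun mi j => if PySem.List.pyGetD arr mi ' ' < PySem.List.pyGetD arr j ' ' then j else mi) (rn : Int))
        = ((k : Nat) : Int) ∧ k < arr.length ∧ c ≤ k ∧
      (∀ l, c ≤ l → l < arr.length → arr.getD l ' ' ≤ arr.getD k ' ') ∧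
      (∀ l, c ≤ l → l < k → arr.getD l ' ' < arr.getD k ' ') := by
  intro fuel
  induction fuel with
  | zero =>
    intro b rn hb hrb hcr hle hlt
    rw [PySem.List.pyRange_one_eq_nil (by omega)]
    exact ⟨rn, rfl, by omega, hcr, fun l hcl hln => hle l hcl (by omega), hlt⟩
  | succ f ih =>
    intro b rn hb hrb hcr hle hlt
    rw [PySem.List.pyRange_one_cons (by exact_mod_cast (by omega : b < arr.length))]
    simp only [List.foldl_cons, PySem.List.pyGetD_natCast]
    by_cases hgt : arr.getD rn ' ' < arr.getD b ' '
    · rw [if_pos hgt]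
      have := ih (b + 1) b (by omega) (by omega) (by omega)
        (fun l hcl hlb => by
          rcases Nat.lt_succ_iff_lt_or_eq.mp hlb with h | h
          · exact le_of_lt (lt_of_le_of_lt (hle l hcl h) hgt)
          · subst h; exact le_refl _)
        (fun l hcl hlb => lt_of_le_of_lt (hle l hcl hlb) hgt)
      simpa using this
    · rw [if_neg hgt]
      exact ih (b + 1) rn (by omega) (by omega) hcr
        (fun l hcl hlb => by
          rcases Nat.lt_succ_iff_lt_or_eq.mp hlb with h | h
          · exact hle l hcl h
          · subst h; exact le_of_not_gt hgt)
        hlt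

lemma innerA_spec (arr : List Char) (i : Nat) (hi : i < arr.length) :
    ∃ k : Nat, swapsInnerA arr (i : Int) = (((i + k : Nat)) : Int) ∧ i + k < arr.length ∧
      (∀ l : Nat, l < k → arr.getD (i + l) ' ' < arr.getD (i + k) ' ') ∧
      (∀ l : Nat, i + l < arr.length → arr.getD (i + l) ' ' ≤ arr.getD (i + k) ' ') := by
  obtain ⟨k', hfold, hkn, hik, hle, hlt⟩ := foldArgmax arr i (arr.length - (i + 1)) (i + 1) i
    (by omega) (by omega) (le_refl i)
    (fun l hcl hlb => by have : l = i := by omega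
                         subst this; exact le_refl _)
    (fun l hcl hlr => by omega)
  refine ⟨k' - i, ?_, by omega, ?_, ?_⟩
  · have : i + (k' - i) = k' := by omega
    rw [swapsInnerA]
    push_cast at hfold ⊢
    rw [hfold]
    omega
  · intro l hl
    have h1 : i + (k' - i) = k' := by omega
    rw [h1]
    exact hlt (i + l) (by omega) (by omega)
  · intro l hl
    have h1 : i + (k' - i) = k' := by omega
    rw [h1]
    exact hle (i + l) (by omega) hl

lemma loopA_zero : ∀ (r : List Int) (arr : List Char), swapsLoopA r (arr, 0) = (arr, 0) := by
  intro r arr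
  cases r with
  | nil => rfl
  | cons i rest => simp [swapsLoopA]

-- the suffix after position i, split at the first maximum position i+k
lemma drop_decomp (arr : List Char) (i k : Nat) (hk : 1 ≤ k) (hkn : i + k < arr.length) :
    arr.drop (i+1)
      = (arr.drop (i+1)).take (k-1) ++ arr.getD (i+k) ' ' :: arr.drop (i+k+1) := by
  conv_lhs => rw [← List.take_append_drop (k-1) (arr.drop (i+1))]
  congr 1
  rw [List.drop_drop]
  have h1 : i + 1 + (k-1) = i + k := by omega
  rw [h1, ← List.getElem_cons_drop (by omega : i + k < arr.length),
    List.getD_eq_getElem arr ' ' (by omega : i + k < arr.length)]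

lemma ulen (arr : List Char) (i k : Nat) (hkn : i + k < arr.length) :
    ((arr.drop (i+1)).take (k-1)).length = k - 1 := by
  rw [List.length_take, List.length_drop]; omega

-- B's list.index finds exactly A's argmax position
lemma index_first (arr : List Char) (i k : Nat) (hk : 1 ≤ k) (hkn : i + k < arr.length)
    (hstrict : ∀ l : Nat, l < k → arr.getD (i + l) ' ' < arr.getD (i + k) ' ') :
    PySem.List.index? (arr.drop (i+1)) (arr.getD (i+k) ' ') = some (k-1) := by
  rw [PySem.List.index?_eq_some_iff]
  refine ⟨(arr.drop (i+1)).take (k-1), arr.drop (i+k+1),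
    drop_decomp arr i k hk hkn, ulen arr i k hkn, ?_⟩
  intro hmem
  obtain ⟨j, hj, hjt⟩ := List.getElem_of_mem hmem
  have hjk : j < k - 1 := by
    have := hj; rw [ulen arr i k hkn] at this; exact this
  have hjlen : j < (arr.drop (i+1)).length := by
    rw [List.length_drop]; omega
  have hval : ((arr.drop (i+1)).take (k-1))[j] = arr.getD (i + (1+j)) ' ' := by
    rw [List.getElem_take, List.getElem_drop,
      List.getD_eq_getElem arr ' ' (by omega : i + (1+j) < arr.length)]
    congr 1; omega
  have := hstrict (1+j) (by omega)
  rw [hval] at hjt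
  rw [hjt] at this
  exact lt_irrefl _ this

-- swapping position i with the max position i+k: the new suffix is still a permutation
lemma swap_drop_perm (arr ts' : List Char) (i k : Nat) (hk : 1 ≤ k) (hkn : i + k < arr.length)
    (hperm : (arr.drop i).Perm (arr.getD (i+k) ' ' :: ts')) :
    (((arr.set i (arr.getD (i+k) ' ')).set (i+k) (arr.getD i ' ')).drop (i+1)).Perm ts' := by
  set a := arr.getD i ' ' with ha
  set b := arr.getD (i+k) ' ' with hb
  set u := (arr.drop (i+1)).take (k-1) with hu
  set v := arr.drop (i+k+1) with hv
  have s1 : arr.drop (i+1) = u ++ b :: v := drop_decomp arr i k hk hkn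
  have s0 : arr.drop i = a :: (u ++ b :: v) := by
    rw [← s1, ← List.getElem_cons_drop (by omega : i < arr.length),
      ha, List.getD_eq_getElem arr ' ' (by omega : i < arr.length)]
  have hulen : u.length = k - 1 := ulen arr i k hkn
  have s2 : ((arr.set i b).set (i+k) a).drop (i+1) = u ++ a :: v := by
    rw [List.drop_set, if_neg (by omega), List.drop_set, if_pos (by omega), s1,
      List.set_append, if_neg (by rw [hulen]; omega)]
    have h2 : i + k - (i+1) - u.length = 0 := by rw [hulen]; omega
    rw [h2, List.set_cons_zero]
  rw [s2]
  have h1 : (arr.drop i).Perm (b :: (a :: (u ++ v))) := by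
    rw [s0]
    exact ((List.perm_middle).cons a).trans (List.Perm.swap b a (u ++ v))
  have h2 : ts'.Perm (a :: (u ++ v)) := (hperm.symm.trans h1).cons_inv
  exact List.perm_middle.trans h2.symm

lemma loop_eq : ∀ (ts arr : List Char) (i : Nat) (swap : Int),
    swap ≠ 0 → i ≤ arr.length → (arr.drop i).Perm ts → ts.Pairwise (fun a b => b ≤ a) →
    (swapsLoopA (PySem.List.pyRange (i : Int) (arr.length : Int)) (arr, swap)).1
      = swapsLoopB (PySem.List.enumerate ts (i : Int)) arr swap := by
  intro ts
  induction ts with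
  | nil =>
    intro arr i swap hs hi hperm hpw
    have hd : arr.drop i = [] := hperm.eq_nil
    have hle : arr.length ≤ i := List.drop_eq_nil_iff.mp hd
    rw [PySem.List.pyRange_one_eq_nil (by exact_mod_cast hle), PySem.List.enumerate_nil]
    rfl
  | cons t ts' ih =>
    intro arr i swap hs hi hperm hpw
    have hlt : i < arr.length := by
      by_contra h
      have hd : arr.drop i = [] := by rw [List.drop_eq_nil_iff]; omega
      have hlen := hperm.length_eq
      rw [hd] at hlen; simp at hlen
    obtain ⟨k, hmi, hkn, hstrict, hmax⟩ := innerA_spec arr i hlt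
    have htmem : t ∈ arr.drop i := hperm.mem_iff.mpr List.mem_cons_self
    have htmax : ∀ x ∈ arr.drop i, x ≤ t := by
      intro x hx
      rcases List.mem_cons.mp (hperm.subset hx) with h | h
      · exact le_of_eq h
      · exact List.rel_of_pairwise_cons hpw h
    have htk : arr.getD (i+k) ' ' = t := by
      apply le_antisymm
      · apply htmax
        have hklen : k < (arr.drop i).length := by rw [List.length_drop]; omega
        have hg : (arr.drop i)[k] = arr[i+k] := List.getElem_drop (h := hklen)
        rw [List.getD_eq_getElem arr ' ' (by omega : i + k < arr.length), ← hg]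
        exact List.getElem_mem _
      · obtain ⟨j, hj, hjt⟩ := List.getElem_of_mem htmem
        have hj' : i + j < arr.length := by
          rw [List.length_drop] at hj; omega
        have heq : arr[i + j] = t := by
          rw [← List.getElem_drop (h := hj)]; exact hjt
        have hmj := hmax j (by omega)
        rw [List.getD_eq_getElem arr ' ' hj', heq] at hmj
        exact hmj
    rw [PySem.List.pyRange_one_cons (by exact_mod_cast hlt), PySem.List.enumerate_cons]
    simp only [swapsLoopA, swapsLoopB, hmi]
    rw [if_neg (by simpa using hs)]
    have hgetd : PySem.List.pyGetD arr (i : Int) ' ' = arr.getD i ' ' :=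
      PySem.List.pyGetD_natCast arr i ' '
    by_cases hit : arr.getD i ' ' = t
    · -- position already holds the maximum: neither side swaps
      have hk0 : k = 0 := by
        by_contra hk
        have h0 := hstrict 0 (by omega)
        rw [Nat.add_zero, hit, htk] at h0
        exact lt_irrefl _ h0
      subst hk0
      rw [if_neg (by simp), if_neg (by rw [hgetd, hit]; simp)]
      have hdi : arr.drop i = t :: arr.drop (i+1) := by
        rw [← List.getElem_cons_drop (by omega : i < arr.length)]
        rw [List.getD_eq_getElem arr ' ' (by omega : i < arr.length)] at hit
        rw [hit]
      have hperm' : (arr.drop (i+1)).Perm ts' := by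
        rw [hdi] at hperm; exact hperm.cons_inv
      have := ih arr (i+1) swap hs (by omega) hperm' hpw.of_cons
      push_cast at this ⊢
      exact this
    · -- a genuine swap at position i
      have hk1 : 1 ≤ k := by
        by_contra hk
        have : k = 0 := by omega
        rw [this, Nat.add_zero] at htk
        exact hit htk
      rw [if_pos (by
        intro h
        have : i + k = i := by exact_mod_cast h
        omega)]
      rw [if_pos (by rw [hgetd]; exact hit)]
      have hcast1 : (i : Int) + 1 = ((i+1 : Nat) : Int) := by push_cast; ring
      rw [hcast1, PySem.List.slice_from_natCast, ← htk,
        index_first arr i k hk1 hkn hstrict]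
      have hj : ((i+1 : Nat) : Int) + ((k-1 : Nat) : Int) = ((i+k : Nat) : Int) := by
        push_cast; omega
      simp only [hj]
      set arr' := PySem.List.pySetD (PySem.List.pySetD arr (i : Int) (PySem.List.pyGetD arr ((i+k : Nat) : Int) ' ')) ((i+k : Nat) : Int) (PySem.List.pyGetD arr (i : Int) ' ') with harr'
      have harr'set : arr' = (arr.set i (arr.getD (i+k) ' ')).set (i+k) (arr.getD i ' ') := by
        rw [harr', PySem.List.pyGetD_natCast arr (i+k) ' ', PySem.List.pyGetD_natCast arr i ' ',
          PySem.List.pySetD_natCast arr i _, PySem.List.pySetD_natCast _ (i+k) _]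
      have hlen' : arr'.length = arr.length := by
        rw [harr'set]; simp
      have hperm' : (arr'.drop (i+1)).Perm ts' := by
        rw [harr'set]
        exact swap_drop_perm arr ts' i k hk1 hkn (by rw [htk]; exact hperm)
      by_cases hsz : swap - 1 = 0
      · rw [hsz]
        rw [if_pos (by simp)]
        rw [loopA_zero]
      · rw [if_neg (by simpa using hsz)]
        have := ih arr' (i+1) (swap - 1) hsz (by omega) hperm' hpw.of_cons
        rw [hlen'] at this
        push_cast at this ⊢
        exact this

-- ===== VERDICT (by name: the statement is the Claim_ definition above) =====
theorem swaps_spec : Claim_equal_swaps := by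
  intro num swap _
  unfold Spec_swaps swaps swaps_alt
  by_cases h0 : swap = 0
  · subst h0
    simp [loopA_zero]
  · simp only [beq_iff_eq, h0, if_false]
    exact loop_eq (PySem.List.sorted num.toList (fun x => x) true) num.toList 0 swap h0
      (by omega) (by simpa using (PySem.List.sorted_perm num.toList (fun x => x) true).symm)
      (PySem.List.sorted_pairwise_rev num.toList (fun x => x)) ▸ rfl
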